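-- pv_equiv track=rewrite | github.com/JoaquinManuelGonzalez/Advent-of-Code-2025 | day_02/part_two_solution.py | is_invalid
-- ===== SOURCE A (Python) =====
-- def is_invalid(num: int) -> bool:
--     num_str = str(num)
--     str_length = len(num_str)
--
--     for pattern_length in range(1, str_length // 2 + 1):
--         if str_length % pattern_length != 0:
--             continue
--         pattern = num_str[:pattern_length]
--
--         if pattern[0] == '0':
--             continue
--
--         if pattern * (str_length // pattern_length) == num_str:
--             return True
--
--     return False
-- ===== SOURCE B (Python) =====
-- def is_invalid(num: int) -> bool:
--     s = str(num)
--     return s in (s + s)[1:-1]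
-- ===== Notes on version B (the rewrite author's own statement) =====
-- stated objective: idiomatic
-- what changed: Replaces A's divisor-enumeration loop (try every pattern length dividing len(str(num)) and rebuild the full string, with a leading-zero guard that is dead because whenever the loop runs, str(num) starts with a sign or a nonzero digit) with the standard one-line string-doubling periodicity test: s is a repetition of a shorter pattern iff s occurs in (s+s)[1:-1].
import Mathlib
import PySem

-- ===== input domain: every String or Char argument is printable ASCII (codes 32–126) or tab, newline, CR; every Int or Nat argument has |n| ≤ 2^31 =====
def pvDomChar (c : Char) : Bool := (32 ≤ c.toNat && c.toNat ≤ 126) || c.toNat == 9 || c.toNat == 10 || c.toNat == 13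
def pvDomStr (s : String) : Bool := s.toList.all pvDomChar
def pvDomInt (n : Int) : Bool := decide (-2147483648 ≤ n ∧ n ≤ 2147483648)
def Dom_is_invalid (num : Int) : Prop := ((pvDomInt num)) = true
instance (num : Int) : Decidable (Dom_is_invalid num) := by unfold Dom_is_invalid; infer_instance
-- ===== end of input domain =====

-- B replaces A's divisor-enumeration loop with the standard string-doubling
-- periodicity test s in (s+s)[1:-1]; same return value on every int (idiomatic, not faster).

-- ===== PORT A =====
-- Python's pattern[0] is read with pyGet?; it is never out of range here
-- (the loop body runs only when len(num_str) >= 2 and pattern_length >= 1, so pattern != '').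
def is_invalid (num : Int) : Bool :=
  let numStr := PySem.Int.toChars num
  let strLength : Int := (numStr.length : Int)
  (PySem.List.pyRange 1 (PySem.Int.floordiv strLength 2 + 1)).any fun patternLength =>
    if PySem.Int.mod strLength patternLength ≠ 0 then false   -- continue
    else
      let pattern := PySem.List.slice numStr none (some patternLength)
      if PySem.List.pyGet? pattern 0 == some '0' then false   -- continue
      else if PySem.List.pyRepeat pattern (PySem.Int.floordiv strLength patternLength) == numStr
        then true else false

-- ===== PORT B =====
def is_invalid_alt (num : Int) : Bool :=
  let s := PySem.Int.toChars num
  PySem.Chars.isIn s (PySem.List.slice (s ++ s) (some 1) (some (-1)))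

-- ===== PRECONDITION & SPEC =====
def Spec_is_invalid (num : Int) (out : Bool) : Prop := out = is_invalid_alt num
instance (num : Int) (out : Bool) : Decidable (Spec_is_invalid num out) := by unfold Spec_is_invalid; infer_instance

-- ===== CLAIM (what is proved, stated in full; the proofs are below) =====
def Claim_equal_is_invalid : Prop := ∀ (num : Int), Dom_is_invalid num → Spec_is_invalid num (is_invalid num)

-- ===== LEMMAS AND PROOFS =====

-- num_str is a whole number of copies of its length-d prefix, for a proper divisor d:
-- the condition A's loop searches for. A's leading-zero guard is dead: whenever the
-- loop range is nonempty, str(num) starts with a sign or a nonzero leading digit.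
def RepeatsAt (cs : List Char) (d : Nat) : Prop :=
  1 ≤ d ∧ d ∣ cs.length ∧ 2 * d ≤ cs.length ∧
    (List.replicate (cs.length / d) (cs.take d)).flatten = cs

-- str(n) for n > 0 starts with a nonzero digit
lemma toDigitsCore_head (f : Nat) : ∀ (n : Nat) (ds : List Char), 0 < n → n < 10 ^ f →
    ∃ c t, Nat.toDigitsCore 10 f n ds = c :: t ∧ c ≠ '0' := by
  induction f with
  | zero => intro n ds h1 h2; omega
  | succ f ih =>
    intro n ds h1 h2
    rw [Nat.toDigitsCore]
    by_cases h : n / 10 = 0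
    · simp only [h]
      have hn : n < 10 := by omega
      refine ⟨(n % 10).digitChar, ds, rfl, ?_⟩
      interval_cases n <;> decide
    · rw [if_neg h]
      exact ih (n / 10) _ (Nat.pos_of_ne_zero h) (by omega)

lemma head_toChars (num : Int) (h : num ≠ 0) :
    ∃ c t, PySem.Int.toChars num = c :: t ∧ c ≠ '0' := by
  unfold PySem.Int.toChars
  by_cases hneg : num < 0
  · exact ⟨'-', _, by rw [if_pos hneg], by decide⟩
  · rw [if_neg hneg]
    unfold Nat.toDigits
    have hpos : 0 < num.toNat := by omega
    exact toDigitsCore_head _ _ [] hpos (by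
      calc num.toNat < 10 ^ num.toNat := Nat.lt_pow_self (by norm_num)
        _ ≤ 10 ^ (num.toNat + 1) := Nat.pow_le_pow_right (by norm_num) (by omega))

lemma getElem?_flatten_replicate (p : List Char) (k j : Nat) (h : j < k * p.length) :
    (List.replicate k p).flatten[j]? = p[j % p.length]? := by
  induction k generalizing j with
  | zero => omega
  | succ k ih =>
    rw [List.replicate_succ, List.flatten_cons]
    by_cases hj : j < p.length
    · rw [List.getElem?_append_left hj, Nat.mod_eq_of_lt hj]
    · rw [Nat.not_lt] at hj
      rw [List.getElem?_append_right hj, ih (j - p.length) (by rw [Nat.succ_mul] at h; omega),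
        Nat.mod_eq_sub_mod hj]

lemma eq_flatten_replicate_of_pointwise (cs : List Char) (g : Nat) (hg : 0 < g)
    (hdvd : g ∣ cs.length) (hpt : ∀ j < cs.length, cs[j]? = cs[j % g]?) :
    (List.replicate (cs.length / g) (cs.take g)).flatten = cs := by
  by_cases h0 : cs.length = 0
  · simp [List.eq_nil_of_length_eq_zero h0]
  have hgle : g ≤ cs.length := Nat.le_of_dvd (by omega) hdvd
  apply List.ext_getElem?
  intro j
  by_cases hj : j < cs.length
  · have htl : (cs.take g).length = g := by simp [Nat.min_eq_left hgle]
    rw [getElem?_flatten_replicate _ _ _ (by rw [htl, Nat.div_mul_cancel hdvd]; exact hj), htl,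
      List.getElem?_take_of_lt (Nat.mod_lt _ hg), ← hpt j hj]
  · have hlen : (List.replicate (cs.length / g) (cs.take g)).flatten.length = cs.length := by
      simp [List.length_flatten, Nat.min_eq_left hgle, Nat.div_mul_cancel hdvd]
    rw [List.getElem?_eq_none (by omega), List.getElem?_eq_none (by omega)]

lemma rotate_of_repeatsAt (cs : List Char) (d : Nat) (h : RepeatsAt cs d) :
    cs.rotate d = cs := by
  obtain ⟨h1, hdvd, h2, heq⟩ := h
  have hd : d ≤ cs.length := by omega
  set p := cs.take d with hpdef
  have hp : p.length = d := by simp [hpdef, Nat.min_eq_left hd]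
  have hk : 2 ≤ cs.length / d := Nat.le_div_iff_mul_le (by omega) |>.mpr (by omega)
  obtain ⟨m, hm⟩ : ∃ m, cs.length / d = m + 1 := ⟨cs.length / d - 1, by omega⟩
  rw [hm] at heq
  have heq1 : p ++ (List.replicate m p).flatten = cs := by
    rw [← heq, List.replicate_succ, List.flatten_cons]
  have heq2 : (List.replicate m p).flatten ++ p = cs := by
    rw [← heq, List.replicate_succ', List.flatten_append]; simp
  rw [List.rotate_eq_drop_append_take hd]
  conv_lhs => rw [← heq1]
  rw [← hp, List.drop_left, List.take_left, heq2]

lemma rotate_mul (cs : List Char) (i : Nat) (h : cs.rotate i = cs) (t : Nat) :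
    cs.rotate (t * i) = cs := by
  induction t with
  | zero => simp
  | succ t ih => rw [Nat.succ_mul, ← List.rotate_rotate, ih, h]

-- a Bezout combination realises gcd i n as (t*i) mod n
lemma exists_mult_mod_gcd (i n : Nat) (hn : 0 < n) :
    ∃ t : Nat, (t * i) % n = Nat.gcd i n % n := by
  set a : Int := Nat.gcdA i n with ha
  have hbez : (Nat.gcd i n : Int) = i * a + n * Nat.gcdB i n := Nat.gcd_eq_gcd_ab i n
  refine ⟨(a % n).toNat, ?_⟩
  have h1 : ((a % n).toNat : Int) = a % n := Int.toNat_of_nonneg (Int.emod_nonneg a (by omega))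
  have hmodeq : ((a % n).toNat * i : Int) % n = (Nat.gcd i n : Int) % n := by
    have e1 : ((a % n).toNat * i : Int) % n = (a * i) % n := by
      rw [h1, Int.mul_emod, Int.emod_emod_of_dvd _ dvd_rfl, ← Int.mul_emod]
    have e2 : (a * i : Int) % n = (Nat.gcd i n : Int) % n :=
      Int.modEq_iff_dvd.mpr ⟨Nat.gcdB i n, by rw [hbez]; ring⟩
    rw [e1, e2]
  exact_mod_cast hmodeq

-- a rotation period g forces every position to agree with position j mod g
lemma pointwise_of_rotate (cs : List Char) (g : Nat) (hg0 : 0 < g)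
    (hrot : cs.rotate g = cs) : ∀ j < cs.length, cs[j]? = cs[j % g]? := by
  have hstep : ∀ j < cs.length, cs[j]? = cs[(j + g) % cs.length]? := by
    intro j hj
    conv_lhs => rw [← hrot]
    have hjr : j < (cs.rotate g).length := by simpa using hj
    rw [List.getElem?_eq_getElem hjr,
      List.getElem?_eq_getElem (show (j + g) % cs.length < cs.length from Nat.mod_lt _ (by omega)),
      List.getElem_rotate]
  intro j
  induction j using Nat.strong_induction_on with
  | _ j ih =>
    intro hj
    by_cases hjg : j < g
    · rw [Nat.mod_eq_of_lt hjg]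
    · have hgj : g ≤ j := Nat.le_of_not_lt hjg
      have h1 : j - g < cs.length := by omega
      have h2 : cs[j - g]? = cs[(j - g + g) % cs.length]? := hstep _ h1
      rw [Nat.sub_add_cancel hgj, Nat.mod_eq_of_lt hj] at h2
      rw [← h2, ih (j - g) (Nat.sub_lt (lt_of_lt_of_le hg0 hgj) hg0) h1,
        Nat.mod_eq_sub_mod hgj]

lemma repeatsAt_of_rotate (cs : List Char) (i : Nat) (hi : 1 ≤ i) (hin : i < cs.length)
    (h : cs.rotate i = cs) : RepeatsAt cs (Nat.gcd i cs.length) := by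
  have hn0 : 0 < cs.length := by omega
  have hg0 : 0 < Nat.gcd i cs.length := Nat.gcd_pos_of_pos_left cs.length hi
  have hgi : Nat.gcd i cs.length ≤ i := Nat.le_of_dvd hi (Nat.gcd_dvd_left i cs.length)
  have hgdvd : Nat.gcd i cs.length ∣ cs.length := Nat.gcd_dvd_right i cs.length
  have h2g : 2 * Nat.gcd i cs.length ≤ cs.length := by
    obtain ⟨c, hc⟩ := hgdvd
    match c, hc with
    | 0, hc => omega
    | 1, hc => omega
    | (c+2), hc =>
      calc 2 * Nat.gcd i cs.length ≤ Nat.gcd i cs.length * (c + 2) := by nlinarith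
        _ = cs.length := hc.symm
  have hrot : cs.rotate (Nat.gcd i cs.length) = cs := by
    obtain ⟨t, ht⟩ := exists_mult_mod_gcd i cs.length hn0
    have h1 : cs.rotate (t * i % cs.length) = cs := by
      rw [List.rotate_mod]; exact rotate_mul cs i h t
    rwa [ht, Nat.mod_eq_of_lt (by omega)] at h1
  exact ⟨hg0, Nat.gcd_dvd_right i cs.length, h2g,
    eq_flatten_replicate_of_pointwise cs _ hg0 (Nat.gcd_dvd_right i cs.length)
      (pointwise_of_rotate cs _ hg0 hrot)⟩

-- nontrivial self-rotation ↔ repetition of a proper-divisor-length pattern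
lemma rotation_iff_repetition (cs : List Char) :
    (∃ i, 1 ≤ i ∧ i < cs.length ∧ cs.rotate i = cs) ↔ ∃ d, RepeatsAt cs d := by
  constructor
  · rintro ⟨i, hi, hin, h⟩
    exact ⟨_, repeatsAt_of_rotate cs i hi hin h⟩
  · rintro ⟨d, hd⟩
    exact ⟨d, hd.1, by have := hd.2.2.1; have := hd.1; omega, rotate_of_repeatsAt cs d hd⟩

-- A's loop finds exactly the RepeatsAt witnesses (num ≠ 0 kills the leading-zero guard)
lemma A_iff (num : Int) (hnum : num ≠ 0) :
    is_invalid num = true ↔ ∃ d, RepeatsAt (PySem.Int.toChars num) d := by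
  obtain ⟨c, t, hct, hc0⟩ := head_toChars num hnum
  set cs := PySem.Int.toChars num with hcsdef
  set n := cs.length with hndef
  have hfd2 : PySem.Int.floordiv (n : Int) 2 = ((n / 2 : Nat) : Int) := by
    exact_mod_cast PySem.Int.floordiv_natCast n 2
  show (PySem.List.pyRange 1 (PySem.Int.floordiv (n : Int) 2 + 1)).any _ = true ↔ _
  rw [List.any_eq_true]
  constructor
  · rintro ⟨pl, hmem, hbody⟩
    rw [PySem.List.mem_pyRange_one] at hmem
    obtain ⟨hpl1, hpl2⟩ := hmem
    rw [hfd2] at hpl2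
    set d := pl.toNat with hddef
    have hpld : pl = (d : Int) := by omega
    have hd1 : 1 ≤ d := by omega
    have h2d : 2 * d ≤ n := by
      have : (d : Int) ≤ ((n / 2 : Nat) : Int) := by omega
      have : d ≤ n / 2 := by exact_mod_cast this
      omega
    simp only at hbody
    split_ifs at hbody with hmod hguard hrep
    -- split_ifs closes every branch whose body is `false`; only the success path remains
    rw [not_not, PySem.Int.mod_eq_zero_iff_dvd, hpld, Int.natCast_dvd_natCast] at hmod
    refine ⟨d, hd1, hmod, h2d, ?_⟩
    have hsl := PySem.List.slice_to (PySem.Int.toChars num) (b := pl) (by omega)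
    rw [hsl, hpld, PySem.Int.floordiv_natCast] at hrep
    simp only [beq_iff_eq, PySem.List.pyRepeat] at hrep
    simpa using hrep
  · rintro ⟨d, hd1, hdvd, h2d, hflat⟩
    refine ⟨(d : Int), ?_, ?_⟩
    · rw [PySem.List.mem_pyRange_one, hfd2]
      have : d ≤ n / 2 := by omega
      constructor
      · exact_mod_cast hd1
      · have : (d : Int) ≤ ((n / 2 : Nat) : Int) := by exact_mod_cast this
        omega
    · simp only
      rw [if_neg (by rw [not_not, PySem.Int.mod_eq_zero_iff_dvd, Int.natCast_dvd_natCast]; exact hdvd)]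
      have hsl := PySem.List.slice_to (PySem.Int.toChars num) (b := (d : Int)) (by omega)
      rw [hsl, Int.toNat_natCast]
      obtain ⟨d', rfl⟩ : ∃ d', d = d' + 1 := ⟨d - 1, by omega⟩
      rw [if_neg (by
        rw [show PySem.Int.toChars num = c :: t from hct]
        simp only [List.take_succ_cons]
        simp [PySem.List.pyGet?, PySem.List.pyIdx?, hc0])]
      rw [PySem.Int.floordiv_natCast]
      simp only [PySem.List.pyRepeat, Int.toNat_natCast]
      rw [if_pos (by rw [beq_iff_eq]; exact hflat)]

-- (s + s)[1:-1] as drop/take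
lemma mid_eq (s : List Char) (hs : s ≠ []) :
    PySem.List.slice (s ++ s) (some 1) (some (-1)) =
      ((s ++ s).drop 1).take (2 * s.length - 2) := by
  have h1 : 0 < s.length := List.length_pos_iff.mpr hs
  simp only [PySem.List.slice, PySem.List.clampIdx, List.length_append]
  have e1 : (if (1:Int) < 0 then if (↑(s.length + s.length) : Int) + 1 < 0 then 0
      else ((↑(s.length + s.length) : Int) + 1).toNat else min (1:Int).toNat (s.length + s.length)) = 1 := by
    rw [if_neg (by omega)]; omega
  have e2 : (if (-1:Int) < 0 then if (↑(s.length + s.length) : Int) + (-1) < 0 then 0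
      else ((↑(s.length + s.length) : Int) + (-1)).toNat else min (-1:Int).toNat (s.length + s.length)) = 2 * s.length - 1 := by
    rw [if_pos (by omega), if_neg (by omega)]; omega
  rw [e1, e2, show 2 * s.length - 1 - 1 = 2 * s.length - 2 from by omega]

lemma take_drop_double (s : List Char) (i : Nat) (hi : i ≤ s.length) :
    ((s ++ s).drop i).take s.length = s.rotate i := by
  rw [List.drop_append_of_le_length hi, List.rotate_eq_drop_append_take hi]
  have h : s.length = (s.drop i).length + i := by simp; omega
  rw [h, List.take_append]
  simp

-- B finds exactly the nontrivial self-rotations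
lemma B_iff (num : Int) (hcs : PySem.Int.toChars num ≠ []) :
    is_invalid_alt num = true ↔
      ∃ i, 1 ≤ i ∧ i < (PySem.Int.toChars num).length ∧
        (PySem.Int.toChars num).rotate i = PySem.Int.toChars num := by
  set s := PySem.Int.toChars num with hsdef
  set n := s.length with hndef
  have hn : 0 < n := List.length_pos_iff.mpr hcs
  show PySem.Chars.isIn s (PySem.List.slice (s ++ s) (some 1) (some (-1))) = true ↔ _
  rw [← PySem.Chars.exists_prefix_drop_iff_isIn, mid_eq s hcs]
  constructor
  · rintro ⟨j, hpre⟩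
    have hlen : n ≤ 2 * n - 2 - j := by
      have := hpre.length_le
      simp only [List.length_drop, List.length_take, List.length_append] at this
      omega
    have hj2 : j + 1 ≤ n := by omega
    have hcseq := List.prefix_iff_eq_take.mp hpre
    rw [List.drop_take, List.drop_drop, List.take_take, ← hndef] at hcseq
    refine ⟨j + 1, by omega, by omega, ?_⟩
    rw [← take_drop_double s (j + 1) hj2, ← hndef, show j + 1 = 1 + j from by omega]
    rw [show min n (2 * n - 2 - j) = n from by omega] at hcseq
    exact hcseq.symm
  · rintro ⟨i, h1, h2, hrot⟩
    refine ⟨i - 1, List.prefix_iff_eq_take.mpr ?_⟩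
    rw [List.drop_take, List.drop_drop, ← hndef,
      show 1 + (i - 1) = i from by omega, List.take_take,
      show min n (2 * n - 2 - (i - 1)) = n from by omega,
      take_drop_double s i (by omega), hrot]

-- ===== VERDICT (by name: the statement is the Claim_ definition above) =====
theorem is_invalid_spec : Claim_equal_is_invalid := by
  intro num _
  unfold Spec_is_invalid
  by_cases h0 : num = 0
  · subst h0; decide
  · obtain ⟨c, t, hct, hc⟩ := head_toChars num h0
    have hne : PySem.Int.toChars num ≠ [] := by rw [hct]; simp
    rw [Bool.eq_iff_iff, A_iff num h0, B_iff num hne, rotation_iff_repetition]
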